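-- pv_equiv track=rewrite | github.com/d4ndres/Reader-FacEle | extractMetadata.py | crear_diccionario
-- ===== SOURCE A (Python) =====
-- def crear_diccionario(datos):
--   # Crear el diccionario secundario vacío
--   diccionario_secundario = {}
--
--     # Recorrer la lista de datos comenzando desde el segundo elemento
--   for i in range(1, len(datos)):
--     if datos[i].endswith(':'):
--       # Inicializar el valor como None
--       valor = None
--       # Si el siguiente elemento no termina con ':', lo usamos como valor
--       if i + 1 < len(datos) and not datos[i + 1].endswith(':'):
--         valor = datos[i + 1]
--       diccionario_secundario[datos[i]] = valor
--
--     # Crear el diccionario principal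
--   diccionario_principal = {datos[0]: diccionario_secundario}
--   return diccionario_principal
-- ===== SOURCE B (Python) =====
-- def crear_diccionario(datos):
--     secundario = {}
--     prev_label = None
--     for e in datos[1:]:
--         if e.endswith(':'):
--             secundario[e] = None
--             prev_label = e
--         elif prev_label is not None:
--             secundario[prev_label] = e
--             prev_label = None
--     return {datos[0]: secundario}
-- ===== Notes on version B (the rewrite author's own statement) =====
-- stated objective: alternative
-- what changed: Replaced the indexed loop with a one-element lookahead (datos[i+1]) by a single forward pass over datos[1:] carrying a prev_label state that is set by a label and consumed by the next non-label element.
import Mathlib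
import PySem

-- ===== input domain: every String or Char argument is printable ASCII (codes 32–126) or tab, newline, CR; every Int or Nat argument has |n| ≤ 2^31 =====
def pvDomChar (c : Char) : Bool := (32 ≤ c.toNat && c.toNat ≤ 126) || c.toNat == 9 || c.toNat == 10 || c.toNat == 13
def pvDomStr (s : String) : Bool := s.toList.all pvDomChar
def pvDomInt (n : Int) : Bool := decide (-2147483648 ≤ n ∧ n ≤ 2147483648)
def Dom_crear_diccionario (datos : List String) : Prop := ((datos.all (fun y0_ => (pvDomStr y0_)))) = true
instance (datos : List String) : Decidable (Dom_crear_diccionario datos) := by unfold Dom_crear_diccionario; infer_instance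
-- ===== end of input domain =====

-- B replaces A's indexed loop with lookahead datos[i+1] by a single forward pass over
-- datos[1:] carrying a prev_label state (alternative decomposition, same cost).

-- ===== PORT A =====
-- A's for-loop body as a named helper (the loop body of the Python, step for step)
def stepA (xs : List String) (d : PySem.Dict String (Option String)) (i : Int) :
    PySem.Dict String (Option String) :=
  match PySem.List.pyGet? xs i with
  | none => d
  | some s =>
    if PySem.Str.endswith s ":" then
      let valor : Option String :=
        if i + 1 < (xs.length : Int) then
          match PySem.List.pyGet? xs (i + 1) with
          | none => none
          | some nxt => if PySem.Str.endswith nxt ":" then none else some nxt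
        else none
      d.insert s valor
    else d

def crear_diccionario (datos : List String) : List (String × Option (List (String × Option String))) :=
  let sec := (PySem.List.pyRange 1 (datos.length : Int) 1).foldl (stepA datos) PySem.Dict.empty
  match datos with
  | [] => []   -- Python raises IndexError on datos[0] here (excluded by Pre_)
  | d0 :: _ => [(d0, some sec.items)]

-- ===== PORT B =====
-- B's for-loop body: state = (secondary dict, prev_label)
def stepB (st : PySem.Dict String (Option String) × Option String) (e : String) :
    PySem.Dict String (Option String) × Option String :=
  if PySem.Str.endswith e ":" then (st.1.insert e none, some e)
  else
    match st.2 with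
    | some p => (st.1.insert p (some e), none)
    | none => st

def crear_diccionario_alt (datos : List String) : List (String × Option (List (String × Option String))) :=
  let st := (PySem.List.slice datos (some 1) none).foldl stepB (PySem.Dict.empty, none)
  match datos with
  | [] => []   -- Python raises IndexError on datos[0] here (excluded by Pre_)
  | d0 :: _ => [(d0, some st.1.items)]

-- ===== PRECONDITION & SPEC =====
-- Pre_ excludes only the empty list, on which A raises IndexError (datos[0]).
def Pre_crear_diccionario (datos : List String) : Prop := datos ≠ []
instance (datos : List String) : Decidable (Pre_crear_diccionario datos) := by
  unfold Pre_crear_diccionario; infer_instance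

def pvWitness_crear_diccionario : List String := ["titulo", "a:", "1", "b:", "c:", "x"]

def Spec_crear_diccionario (datos : List String) (out : List (String × Option (List (String × Option String)))) : Prop := out = crear_diccionario_alt datos
instance (datos : List String) (out : List (String × Option (List (String × Option String)))) : Decidable (Spec_crear_diccionario datos out) := by unfold Spec_crear_diccionario; infer_instance

-- ===== CLAIM (what is proved, stated in full; the proofs are below) =====
def Claim_equal_crear_diccionario : Prop := ∀ (datos : List String), Dom_crear_diccionario datos → Pre_crear_diccionario datos → Spec_crear_diccionario datos (crear_diccionario datos)

-- ===== LEMMAS AND PROOFS =====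

-- common characterisation: process the suffix after datos[0], label-by-label
def gAux : List String → PySem.Dict String (Option String) → PySem.Dict String (Option String)
  | [], d => d
  | [a], d => if PySem.Str.endswith a ":" then d.insert a none else d
  | a :: b :: r, d =>
      if PySem.Str.endswith a ":" then
        gAux (b :: r) (d.insert a (if PySem.Str.endswith b ":" then none else some b))
      else gAux (b :: r) d

lemma gAux_cons_not_label (a : String) (l : List String) (d : PySem.Dict String (Option String))
    (h : PySem.Str.endswith a ":" = false) : gAux (a :: l) d = gAux l d := by
  have h' : PySem.Chars.endswith a.toList [':'] = false := by simpa using h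
  cases l with
  | nil => simp [gAux, h']
  | cons b r => simp [gAux, h']

lemma aLoop (suf : List String) : ∀ (pre : List String) (d : PySem.Dict String (Option String)),
    (PySem.List.pyRange (pre.length : Int) (((pre ++ suf).length : Nat) : Int) 1).foldl
      (stepA (pre ++ suf)) d = gAux suf d := by
  induction suf with
  | nil =>
    intro pre d
    rw [PySem.List.pyRange_one_eq_nil (by simp)]
    simp [gAux]
  | cons a r ih =>
    intro pre d
    have hlt : (pre.length : Int) < (((pre ++ a :: r).length : Nat) : Int) := by
      have : pre.length < (pre ++ a :: r).length := by simp
      exact_mod_cast this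
    rw [PySem.List.pyRange_one_cons hlt, List.foldl_cons]
    have h0 : PySem.List.pyGet? (pre ++ a :: r) ((pre.length : Nat) : Int) = some a := by
      rw [PySem.List.pyGet?_natCast]
      simp
    have hlen : (((pre ++ [a]).length : Nat) : Int) = (pre.length : Int) + 1 := by simp
    by_cases ha : PySem.Str.endswith a ":"
    · have hac : PySem.Chars.endswith a.toList [':'] = true := by simpa using ha
      cases r with
      | nil =>
        have hnlt : ¬ ((pre.length : Int) + 1 < (((pre ++ [a]).length : Nat) : Int)) := by
          rw [hlen]; omega
        have hstep : stepA (pre ++ [a]) d (pre.length : Int) = d.insert a none := by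
          simp only [stepA, h0, ha, if_pos, hnlt, ite_false]
        rw [hstep, PySem.List.pyRange_one_eq_nil (by rw [hlen])]
        simp [gAux, hac]
      | cons b r' =>
        have hlt2 : ((pre.length : Int)) + 1 < (((pre ++ a :: b :: r').length : Nat) : Int) := by
          have : pre.length + 1 < (pre ++ a :: b :: r').length := by simp
          exact_mod_cast this
        have hget2 : PySem.List.pyGet? (pre ++ a :: b :: r') ((pre.length : Int) + 1) = some b := by
          have hc : ((pre.length : Nat) : Int) + 1 = (((pre.length + 1 : Nat)) : Int) := by push_cast; ring
          rw [hc, PySem.List.pyGet?_natCast]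
          rw [show pre ++ a :: b :: r' = (pre ++ [a]) ++ b :: r' from by simp]
          rw [List.getElem?_append_right (by simp)]
          simp
        have hstep : stepA (pre ++ a :: b :: r') d (pre.length : Int) =
            d.insert a (if PySem.Str.endswith b ":" then none else some b) := by
          simp only [stepA, h0, ha, if_pos, hlt2, hget2]
        rw [hstep]
        have := ih (pre ++ [a]) (d.insert a (if PySem.Str.endswith b ":" then none else some b))
        rw [show pre ++ a :: b :: r' = (pre ++ [a]) ++ b :: r' from by simp, ← hlen]
        rw [this]
        simp [gAux, hac]
    · have hac : PySem.Chars.endswith a.toList [':'] = false := by simpa using ha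
      have hstep : stepA (pre ++ a :: r) d (pre.length : Int) = d := by
        simp only [stepA, h0]
        simp [hac]
      rw [hstep]
      rw [show pre ++ a :: r = (pre ++ [a]) ++ r from by simp, ← hlen]
      rw [ih (pre ++ [a]) d]
      exact (gAux_cons_not_label a r d (by simpa using ha)).symm

lemma bLoop (l : List String) : ∀ (d : PySem.Dict String (Option String)),
    ((l.foldl stepB (d, none)).1 = gAux l d) ∧
    (∀ a : String, PySem.Str.endswith a ":" = true →
      (l.foldl stepB (d.insert a none, some a)).1 = gAux (a :: l) d) := by
  induction l with
  | nil =>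
    intro d
    refine ⟨rfl, ?_⟩
    intro a ha
    have hac : PySem.Chars.endswith a.toList [':'] = true := by simpa using ha
    simp [gAux, hac]
  | cons b r ih =>
    intro d
    constructor
    · rw [List.foldl_cons]
      by_cases hb : PySem.Str.endswith b ":"
      · simp only [stepB, hb, if_pos]
        exact (ih d).2 b hb
      · simp only [stepB, hb]
        rw [gAux_cons_not_label b r d (by simpa using hb)]
        exact (ih d).1
    · intro a ha
      have hac : PySem.Chars.endswith a.toList [':'] = true := by simpa using ha
      rw [List.foldl_cons]
      by_cases hb : PySem.Str.endswith b ":"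
      · have hbc : PySem.Chars.endswith b.toList [':'] = true := by simpa using hb
        simp only [stepB, hb, if_pos]
        have hg : gAux (a :: b :: r) d = gAux (b :: r) (d.insert a none) := by
          simp [gAux, hac, hbc]
        rw [hg]
        exact (ih (d.insert a none)).2 b hb
      · have hbc : PySem.Chars.endswith b.toList [':'] = false := by simpa using hb
        simp only [stepB, hb]
        have hins : (d.insert a none).insert a (some b) = d.insert a (some b) :=
          PySem.Dict.insert_insert_self d a none (some b)
        rw [hins]
        have hg : gAux (a :: b :: r) d = gAux r (d.insert a (some b)) := by
          have h1 : gAux (a :: b :: r) d = gAux (b :: r) (d.insert a (some b)) := by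
            simp [gAux, hac, hbc]
          rw [h1]
          exact gAux_cons_not_label b r _ (by simpa using hb)
        rw [hg]
        exact (ih (d.insert a (some b))).1

-- ===== VERDICT (by name: the statement is the Claim_ definition above) =====
theorem crear_diccionario_spec : Claim_equal_crear_diccionario := by
  intro datos _ hpre
  unfold Spec_crear_diccionario
  cases datos with
  | nil => exact absurd rfl hpre
  | cons d0 tl =>
    unfold crear_diccionario crear_diccionario_alt
    have hA : (PySem.List.pyRange 1 (((d0 :: tl).length : Nat) : Int) 1).foldl
        (stepA (d0 :: tl)) PySem.Dict.empty = gAux tl PySem.Dict.empty := by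
      have := aLoop tl [d0] PySem.Dict.empty
      simpa using this
    have hslice : PySem.List.slice (d0 :: tl) (some 1) none = tl := by
      simp [PySem.List.slice_from]
    have hB : ((PySem.List.slice (d0 :: tl) (some 1) none).foldl stepB
        (PySem.Dict.empty, none)).1 = gAux tl PySem.Dict.empty := by
      rw [hslice]; exact (bLoop tl PySem.Dict.empty).1
    simp only [hA]
    simp only [← hB]
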